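-- pv_equiv track=rewrite | github.com/miliar/Code_Jam_Webscraper | solutions_python/Problem_148/88.py | solve_small
-- ===== SOURCE A (Python) =====
-- def solve_small(case):
--     N, X, Ss = case
--     table = [0] * 701
--     for i in range(N):
--         table[Ss[i]] += 1
--     Ss.sort()
--
--     res = 0
--     nleft = N
--     for i in range(N):
--         if nleft == 0: break
--         t = Ss[i]
--         if table[Ss[i]] == 0:
--             continue
--         table[t] -= 1
--
--         s = X - t
--
--         j = s
--         while j > 0:
--             if table[j] > 0:
--                 table[j] -= 1
--                 nleft -= 1
--                 break
--             j -= 1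
--         nleft -= 1
--         res += 1
--     return res
-- ===== SOURCE B (Python) =====
-- def solve_small(case):
--     N, X, Ss = case
--     if N <= 0:
--         return 0
--     a = sorted(Ss)
--     res = 0
--     lo, hi = 0, N - 1
--     while lo <= hi:
--         if lo < hi and a[lo] + a[hi] <= X:
--             lo += 1
--         hi -= 1
--         res += 1
--     return res
-- ===== Notes on version B (the rewrite author's own statement) =====
-- stated objective: alternative
-- what changed: B replaces A's greedy simulation (701-bucket counting table plus, per element, a linear downward scan of up to 700 buckets for the largest fitting partner) by the classic two-pointer pairing scan on the sorted array: lo/hi converge once, pairing a[lo] with a[hi] when a[lo]+a[hi] <= X, else leaving a[hi] single; the group count is the same because both realise a maximum matching of pairs with sum <= X.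
-- outside the precondition, e.g. on solve_small((1, 10, [7, 3])): A returns 0, B returns 1; on solve_small((2, 5, [0, 0])): A returns 2, B returns 1; on solve_small((3, -185, [-355, 670, -70])): A returns 3, B returns 2
import Mathlib
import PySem

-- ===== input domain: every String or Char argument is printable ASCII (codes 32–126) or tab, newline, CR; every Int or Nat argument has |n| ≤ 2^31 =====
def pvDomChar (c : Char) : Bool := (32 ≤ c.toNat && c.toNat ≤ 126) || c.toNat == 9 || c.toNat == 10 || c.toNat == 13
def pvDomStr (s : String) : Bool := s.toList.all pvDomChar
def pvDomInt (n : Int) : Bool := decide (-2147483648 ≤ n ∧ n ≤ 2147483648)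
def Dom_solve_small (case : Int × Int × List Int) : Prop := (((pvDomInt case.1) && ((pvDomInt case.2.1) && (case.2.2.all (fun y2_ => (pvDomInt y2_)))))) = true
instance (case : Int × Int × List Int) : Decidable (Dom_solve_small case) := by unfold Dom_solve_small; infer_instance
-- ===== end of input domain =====

-- B replaces A's greedy simulation (counting table + per-element downward bucket scan for the
-- largest fitting partner) by the classic two-pointer pairing scan on the sorted array; both
-- realise a maximum matching of pairs with sum ≤ X, so the group counts agree. A sorts Ss in
-- place; B does not mutate its argument — the equivalence proved here is about the RETURN value only.

-- ===== PORT A =====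
-- for i in range(N): table[Ss[i]] += 1   (pySetD/pyGetD total forms: Pre_ keeps every index in range)
def pvBuildTable (Ss : List Int) (is : List Int) (table : List Int) : List Int :=
  is.foldl (fun tb i =>
    PySem.List.pySetD tb (PySem.List.pyGetD Ss i 0)
      (PySem.List.pyGetD tb (PySem.List.pyGetD Ss i 0) 0 + 1)) table

-- j = s; while j > 0: if table[j] > 0: break / j -= 1   — returns the j found (caller decrements)
def pvInnerFindGo (table : List Int) : Nat → Int → Option Int
  | 0, _ => none
  | f + 1, j =>
    if 0 < j then
      if PySem.List.pyGetD table j 0 > 0 then some j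
      else pvInnerFindGo table f (j - 1)
    else none

def pvInnerFind (table : List Int) (j : Int) : Option Int :=
  pvInnerFindGo table j.toNat j

-- the outer 'for i in range(N)' loop with its break/continue, threading (table, res, nleft)
def pvOuterA (ss : List Int) (X : Int) : List Int → List Int → Int → Int → Int
  | [], _, res, _ => res
  | i :: is, table, res, nleft =>
    if nleft = 0 then res
    else
      let t := PySem.List.pyGetD ss i 0
      if PySem.List.pyGetD table t 0 = 0 then
        pvOuterA ss X is table res nleft
      else
        let table1 := PySem.List.pySetD table t (PySem.List.pyGetD table t 0 - 1)
        match pvInnerFind table1 (X - t) with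
        | some j =>
            pvOuterA ss X is (PySem.List.pySetD table1 j (PySem.List.pyGetD table1 j 0 - 1))
              (res + 1) (nleft - 2)
        | none => pvOuterA ss X is table1 (res + 1) (nleft - 1)

def solve_small (case : Int × Int × List Int) : Int :=
  let N := case.1
  let X := case.2.1
  let Ss := case.2.2
  let table := pvBuildTable Ss (PySem.List.pyRange 0 N) (List.replicate 701 0)
  let ss := PySem.List.sorted Ss (fun x => x) false
  pvOuterA ss X (PySem.List.pyRange 0 N) table 0 N

-- ===== PORT B =====
-- while lo <= hi: if lo < hi and a[lo] + a[hi] <= X: lo += 1; hi -= 1; res += 1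
-- (fuel = N bounds the iteration count: hi - lo shrinks by at least 1 per iteration)
def pvTP (a : List Int) (X : Int) : Nat → Int → Int → Int → Int
  | 0, _, _, res => res
  | f + 1, lo, hi, res =>
    if lo ≤ hi then
      if lo < hi ∧ PySem.List.pyGetD a lo 0 + PySem.List.pyGetD a hi 0 ≤ X then
        pvTP a X f (lo + 1) (hi - 1) (res + 1)
      else
        pvTP a X f lo (hi - 1) (res + 1)
    else res

def solve_small_alt (case : Int × Int × List Int) : Int :=
  let N := case.1
  let X := case.2.1
  let Ss := case.2.2
  if N ≤ 0 then 0
  else pvTP (PySem.List.sorted Ss (fun x => x) false) X N.toNat 0 (N - 1) 0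

-- ===== PRECONDITION & SPEC =====
-- Pre_ admits N ≤ 0 (both loops are empty) and the task's natural domain (N is the length of Ss,
-- sizes are 1..700 — the table's buckets — and X small enough that the partner scan X - t stays in
-- the table): outside it A either raises IndexError (value > 700 or < -701, N > len(Ss),
-- X - min(Ss) > 700) or its value is an artefact of the 701-entry table (negative values wrap around
-- to high buckets, a 0 can never be chosen as a partner by the 'while j > 0' scan, 0 < N < len(Ss)
-- mixes unsorted-prefix counts with sorted-prefix iteration).
def Pre_solve_small (case : Int × Int × List Int) : Prop :=
  case.1 ≤ 0 ∨
    (case.1 = (case.2.2.length : Int) ∧ ∀ v ∈ case.2.2, 1 ≤ v ∧ v ≤ 700 ∧ case.2.1 ≤ 700 + v)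

instance (case : Int × Int × List Int) : Decidable (Pre_solve_small case) := by
  unfold Pre_solve_small; infer_instance

def pvWitness_solve_small : (Int × Int × List Int) := (2, 5, [2, 3])

def Spec_solve_small (case : Int × Int × List Int) (out : Int) : Prop := out = solve_small_alt case
instance (case : Int × Int × List Int) (out : Int) : Decidable (Spec_solve_small case out) := by
  unfold Spec_solve_small; infer_instance

-- ===== CLAIM (what is proved, stated in full; the proofs are below) =====
def Claim_equal_solve_small : Prop := ∀ (case : Int × Int × List Int), Dom_solve_small case → Pre_solve_small case → Spec_solve_small case (solve_small case)

-- ===== LEMMAS AND PROOFS =====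

-- ---- intermediate abstraction: A's greedy as a list process (proof gadget, used by both bridges)

-- backward scan for the last index k with rem[k] ≤ s, removing it on success
def pvPartnerGo (rem : List Int) (s : Int) : Nat → Int → Option (List Int)
  | 0, _ => none
  | f + 1, k =>
    if 0 ≤ k then
      if PySem.List.pyGetD rem k 0 ≤ s then
        some (PySem.List.slice rem none (some k) ++ PySem.List.slice rem (some (k + 1)) none)
      else pvPartnerGo rem s f (k - 1)
    else none

def pvPartner (rem : List Int) (s : Int) (k : Int) : Option (List Int) :=
  pvPartnerGo rem s (k + 1).toNat k

-- the greedy over the remaining sorted list: remove head, remove its largest fitting partner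
def pvGoB (X : Int) : Nat → List Int → Int → Int
  | 0, _, res => res
  | i + 1, rem, res =>
    match rem with
    | [] => res
    | t :: rest =>
      match pvPartner rest (X - t) ((rest.length : Int) - 1) with
      | some r2 => pvGoB X i r2 (res + 1)
      | none => pvGoB X i rest (res + 1)

theorem pvPartnerGo_some_length : ∀ (fuel : Nat) (rem : List Int) (s k : Int),
    k < (rem.length : Int) → ∀ r, pvPartnerGo rem s fuel k = some r →
    r.length + 1 = rem.length := by
  intro fuel
  induction fuel with
  | zero =>
      intro rem s k hk r hr
      exact absurd hr (by simp [pvPartnerGo])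
  | succ f ih =>
      intro rem s k hk r hr
      simp only [pvPartnerGo] at hr
      by_cases h0 : 0 ≤ k
      · rw [if_pos h0] at hr
        by_cases hle : PySem.List.pyGetD rem k 0 ≤ s
        · rw [if_pos hle, PySem.List.slice_to rem h0, PySem.List.slice_from rem (by omega)] at hr
          have : (rem.take k.toNat ++ rem.drop (k + 1).toNat) = r := Option.some.inj hr
          subst this
          have h1 : k.toNat < rem.length := by omega
          simp [List.length_take, List.length_drop]
          omega
        · rw [if_neg hle] at hr
          exact ih rem s (k - 1) (by omega) r hr
      · rw [if_neg h0] at hr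
        exact absurd hr (by simp)

theorem pvPartner_some_length (rem : List Int) (s k : Int) (hk : k < (rem.length : Int))
    (r : List Int) (hr : pvPartner rem s k = some r) : r.length + 1 = rem.length := by
  unfold pvPartner at hr
  exact pvPartnerGo_some_length (k + 1).toNat rem s k hk r hr

-- reading a table bucket: pyGetD at 0 ≤ v ≤ 700 on a 701-entry list is List.getD
theorem pv_getD_conv (xs : List Int) (hl : xs.length = 701) (v : Int) (h0 : 0 ≤ v) (h7 : v ≤ 700) :
    PySem.List.pyGetD xs v 0 = xs.getD v.toNat 0 := by
  rw [PySem.List.pyGetD_eq_getElem xs 0 h0 (by omega),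
      List.getD_eq_getElem xs 0 (by omega)]

theorem pv_getD_conv' (xs : List Int) (k : Int) (h0 : 0 ≤ k) (hk : k < (xs.length : Int)) :
    PySem.List.pyGetD xs k 0 = xs.getD k.toNat 0 := by
  rw [PySem.List.pyGetD_eq_getElem xs 0 h0 hk, List.getD_eq_getElem xs 0 (by omega)]

theorem pvGoB_nil (X : Int) (f : Nat) (res : Int) : pvGoB X f [] res = res := by
  cases f <;> rfl

theorem pvGoB_fuel_eq (X : Int) : ∀ (f1 f2 : Nat) (rem : List Int) (res : Int),
    rem.length ≤ f1 → rem.length ≤ f2 → pvGoB X f1 rem res = pvGoB X f2 rem res := by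
  intro f1
  induction f1 with
  | zero =>
      intro f2 rem res h1 h2
      have hrem : rem = [] := by
        cases rem with
        | nil => rfl
        | cons a l => simp at h1
      subst hrem
      rw [pvGoB_nil, pvGoB_nil]
  | succ f1' ih =>
      intro f2 rem res h1 h2
      cases rem with
      | nil => rw [pvGoB_nil, pvGoB_nil]
      | cons t rest =>
          cases f2 with
          | zero => simp at h2
          | succ f2' =>
              simp only [pvGoB]
              cases hp : pvPartner rest (X - t) ((rest.length : Int) - 1) with
              | some r2 =>
                  have hlen := pvPartner_some_length rest (X - t) _ (by omega) r2 hp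
                  simp only [List.length_cons] at h1 h2
                  exact ih f2' r2 (res + 1) (by omega) (by omega)
              | none =>
                  simp only [List.length_cons] at h1 h2
                  exact ih f2' rest (res + 1) (by omega) (by omega)

theorem pvGoB_cons_some {X t : Int} {rest r2 : List Int} (i : Nat) (res : Int)
    (hp : pvPartner rest (X - t) ((rest.length : Int) - 1) = some r2) :
    pvGoB X (i + 1) (t :: rest) res = pvGoB X i r2 (res + 1) := by
  simp only [pvGoB, hp]

theorem pvGoB_cons_none {X t : Int} {rest : List Int} (i : Nat) (res : Int)
    (hp : pvPartner rest (X - t) ((rest.length : Int) - 1) = none) :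
    pvGoB X (i + 1) (t :: rest) res = pvGoB X i rest (res + 1) := by
  simp only [pvGoB, hp]

-- the invariant linking A's table to the greedy's remaining list: bucket v holds the multiplicity of v
def pvTB (table rem : List Int) : Prop :=
  table.length = 701 ∧ ∀ v : Int, 0 ≤ v → v ≤ 700 → table.getD v.toNat 0 = (rem.count v : Int)

theorem pv_build_len (l : List Int) : ∀ tb : List Int,
    (l.foldl (fun tb v' => PySem.List.pySetD tb v' (PySem.List.pyGetD tb v' 0 + 1)) tb).length
      = tb.length := by
  induction l with
  | nil => intro tb; rfl
  | cons a l ih =>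
      intro tb
      simp only [List.foldl_cons]
      rw [ih]
      exact PySem.List.length_pySetD tb a _

theorem pv_build (l : List Int) : ∀ tb : List Int, tb.length = 701 →
    (∀ v ∈ l, 1 ≤ v ∧ v ≤ 700) →
    ∀ v : Int, 0 ≤ v → v ≤ 700 →
    (l.foldl (fun tb v' => PySem.List.pySetD tb v' (PySem.List.pyGetD tb v' 0 + 1)) tb).getD v.toNat 0
      = tb.getD v.toNat 0 + (l.count v : Int) := by
  induction l with
  | nil => intro tb _ _ v _ _; simp
  | cons a l ih =>
      intro tb hlen hb v h0 h7
      obtain ⟨ha1, ha7⟩ := hb a List.mem_cons_self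
      simp only [List.foldl_cons]
      have hstep : PySem.List.pySetD tb a (PySem.List.pyGetD tb a 0 + 1)
          = tb.set a.toNat (tb.getD a.toNat 0 + 1) := by
        rw [PySem.List.pySetD_of_nonneg tb _ (by omega), pv_getD_conv tb hlen a (by omega) ha7]
      rw [hstep]
      rw [ih (tb.set a.toNat (tb.getD a.toNat 0 + 1)) (by simp [hlen])
          (fun w hw => hb w (List.mem_cons_of_mem a hw)) v h0 h7]
      have hset : (tb.set a.toNat (tb.getD a.toNat 0 + 1)).getD v.toNat 0
          = if v.toNat = a.toNat then tb.getD a.toNat 0 + 1 else tb.getD v.toNat 0 := by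
        by_cases hva : v.toNat = a.toNat
        · rw [if_pos hva, hva, List.getD_eq_getElem _ 0 (by simp; omega),
              List.getElem_set_self, List.getD_eq_getElem tb 0 (by omega)]
        · rw [if_neg hva, List.getD_eq_getElem _ 0 (by simp; omega),
              List.getElem_set_ne (by omega)]
          exact (List.getD_eq_getElem tb 0 (by omega)).symm
      rw [hset]
      by_cases hva : v = a
      · subst hva
        rw [if_pos rfl]
        simp
        ring
      · rw [if_neg (by omega)]
        have : (a :: l).count v = l.count v := by
          simp [List.count_cons]
          exact fun h => absurd h.symm hva
        rw [this]

theorem pv_inner_none (table : List Int) (hl : table.length = 701) :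
    ∀ (f : Nat) (s : Int), s.toNat ≤ f → s ≤ 700 →
    (∀ v : Int, 1 ≤ v → v ≤ s → table.getD v.toNat 0 ≤ 0) →
    pvInnerFindGo table f s = none := by
  intro f
  induction f with
  | zero =>
      intro s _ _ _
      rfl
  | succ f ih =>
      intro s h1 hs h0
      simp only [pvInnerFindGo]
      by_cases hp : 0 < s
      · rw [if_pos hp]
        have hv := h0 s (by omega) le_rfl
        rw [pv_getD_conv table hl s (by omega) hs, if_neg (by omega)]
        exact ih (s - 1) (by omega) (by omega) (fun v hv1 hv2 => h0 v hv1 (by omega))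
      · rw [if_neg hp]

theorem pv_inner_some (table : List Int) (hl : table.length = 701) (m : Int) (hm1 : 1 ≤ m)
    (hmtab : 0 < table.getD m.toNat 0) :
    ∀ (f : Nat) (s : Int), s.toNat ≤ f → s ≤ 700 → m ≤ s →
    (∀ v : Int, m < v → v ≤ s → table.getD v.toNat 0 ≤ 0) →
    pvInnerFindGo table f s = some m := by
  intro f
  induction f with
  | zero => intro s h1 _ hms _; omega
  | succ f ih =>
      intro s h1 hs hms hmax
      simp only [pvInnerFindGo]
      rw [if_pos (by omega)]
      by_cases hsm : s = m
      · subst hsm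
        rw [pv_getD_conv table hl s (by omega) hs, if_pos (by omega)]
      · have := hmax s (by omega) le_rfl
        rw [pv_getD_conv table hl s (by omega) hs, if_neg (by omega)]
        exact ih (s - 1) (by omega) (by omega) (by omega)
          (fun v hv1 hv2 => hmax v hv1 (by omega))

theorem pv_partner_none (rem : List Int) (s : Int) :
    ∀ (f : Nat) (k : Int), (k + 1).toNat ≤ f → k < (rem.length : Int) →
    (∀ n : Nat, (n : Int) ≤ k → s < rem.getD n 0) →
    pvPartnerGo rem s f k = none := by
  intro f
  induction f with
  | zero =>
      intro k _ _ _
      rfl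
  | succ f ih =>
      intro k hf hk hgt
      simp only [pvPartnerGo]
      by_cases h0 : 0 ≤ k
      · rw [if_pos h0]
        have := hgt k.toNat (by omega)
        rw [pv_getD_conv' rem k h0 hk, if_neg (by omega)]
        exact ih (k - 1) (by omega) (by omega) (fun n hn => hgt n (by omega))
      · rw [if_neg h0]

theorem pv_partner_some (rem : List Int) (s : Int) (K : Nat) (_hK : K < rem.length)
    (hKle : rem.getD K 0 ≤ s) :
    ∀ (f : Nat) (k : Int), (k + 1).toNat ≤ f → k < (rem.length : Int) → (K : Int) ≤ k →
    (∀ n : Nat, K < n → (n : Int) ≤ k → s < rem.getD n 0) →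
    pvPartnerGo rem s f k = some (rem.take K ++ rem.drop (K + 1)) := by
  intro f
  induction f with
  | zero => intro k hf hk hKk _; omega
  | succ f ih =>
      intro k hf hk hKk hgt
      have h0 : 0 ≤ k := by omega
      simp only [pvPartnerGo]
      rw [if_pos h0]
      by_cases hkK : k.toNat = K
      · have hkeq : k = (K : Int) := by omega
        rw [pv_getD_conv' rem k h0 hk, if_pos (by rw [hkK]; exact hKle)]
        rw [PySem.List.slice_to rem h0, PySem.List.slice_from rem (by omega)]
        have h1 : k.toNat = K := hkK
        have h2 : (k + 1).toNat = K + 1 := by omega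
        rw [h1, h2]
      · have hgtk := hgt k.toNat (by omega) (by omega)
        rw [pv_getD_conv' rem k h0 hk, if_neg (by omega)]
        exact ih (k - 1) (by omega) (by omega) (by omega)
          (fun n hn1 hn2 => hgt n hn1 (by omega))

-- wrappers: pvPartner at the full scan start, characterised by the greatest fitting index
theorem pv_partner_eq_some (rem : List Int) (s : Int) (K : Nat) (hK : K < rem.length)
    (hKle : rem.getD K 0 ≤ s) (hmax : ∀ n : Nat, K < n → n < rem.length → s < rem.getD n 0) :
    pvPartner rem s ((rem.length : Int) - 1) = some (rem.take K ++ rem.drop (K + 1)) := by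
  unfold pvPartner
  exact pv_partner_some rem s K hK hKle _ _ le_rfl (by omega) (by omega)
    (fun n h1 h2 => hmax n h1 (by omega))

theorem pv_partner_eq_none (rem : List Int) (s : Int)
    (h : ∀ n : Nat, n < rem.length → s < rem.getD n 0) :
    pvPartner rem s ((rem.length : Int) - 1) = none := by
  unfold pvPartner
  exact pv_partner_none rem s _ _ le_rfl (by omega) (fun n hn => h n (by omega))

theorem pv_exists_greatest (r : List Int) (s : Int) (i0 : Nat) (h0 : i0 < r.length)
    (hf : r.getD i0 0 ≤ s) :
    ∃ K : Nat, K < r.length ∧ r.getD K 0 ≤ s ∧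
      ∀ n : Nat, K < n → n < r.length → s < r.getD n 0 := by
  set K := Nat.findGreatest (fun i => i < r.length ∧ r.getD i (s + 1) ≤ s) (r.length - 1)
    with hKdef
  have hspec : K < r.length ∧ r.getD K (s + 1) ≤ s := by
    have hP : i0 < r.length ∧ r.getD i0 (s + 1) ≤ s :=
      ⟨h0, by rw [List.getD_eq_getElem _ _ h0]; rw [List.getD_eq_getElem _ _ h0] at hf; exact hf⟩
    have h := Nat.findGreatest_spec (P := fun i => i < r.length ∧ r.getD i (s + 1) ≤ s)
      (n := r.length - 1) (m := i0) (by omega) hP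
    rw [hKdef]
    exact h
  refine ⟨K, hspec.1, ?_, ?_⟩
  · rw [List.getD_eq_getElem _ _ hspec.1]
    have h2 := hspec.2
    rw [List.getD_eq_getElem _ _ hspec.1] at h2
    exact h2
  · intro n h1 h2
    have hng := Nat.findGreatest_is_greatest
      (P := fun i => i < r.length ∧ r.getD i (s + 1) ≤ s)
      (n := r.length - 1) (k := n) (hKdef ▸ h1) (by omega)
    by_contra hc
    push_neg at hc
    exact hng ⟨h2, by rw [List.getD_eq_getElem _ _ h2]; rw [List.getD_eq_getElem _ _ h2] at hc; omega⟩

-- ---- A-side bridge (unchanged from the table/greedy correspondence)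

theorem pv_head_eq (rem : List Int) (t : Int) (hs : rem.Pairwise (· ≤ ·)) (hmem : t ∈ rem)
    (hmin : ∀ v ∈ rem, t ≤ v) : ∃ rest, rem = t :: rest := by
  cases rem with
  | nil => cases hmem
  | cons r0 rr =>
      have h1 : t ≤ r0 := hmin r0 (List.mem_cons_self)
      rcases List.mem_cons.mp hmem with h | h
      · exact ⟨rr, by rw [h]⟩
      · have h2 : r0 ≤ t := (List.pairwise_cons.mp hs).1 t h
        exact ⟨rr, by rw [le_antisymm h2 h1]⟩

theorem pv_dec_bucket (table : List Int) (hl : table.length = 701) (t : Int)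
    (ht0 : 0 ≤ t) (ht7 : t ≤ 700) (v : Int) (h0 : 0 ≤ v) (h7 : v ≤ 700) :
    (PySem.List.pySetD table t (PySem.List.pyGetD table t 0 - 1)).getD v.toNat 0
      = if v = t then table.getD t.toNat 0 - 1 else table.getD v.toNat 0 := by
  rw [PySem.List.pySetD_of_nonneg table _ ht0, pv_getD_conv table hl t ht0 ht7]
  by_cases hvt : v = t
  · subst hvt
    rw [if_pos rfl, List.getD_eq_getElem _ 0 (by simp [hl]; omega), List.getElem_set_self]
  · rw [if_neg hvt, List.getD_eq_getElem _ 0 (by simp [hl]; omega),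
        List.getElem_set_ne (by omega)]
    exact (List.getD_eq_getElem table 0 (by omega)).symm

theorem pv_count_cons_le {v t : Int} {l1 l2 : List Int}
    (h : (t :: l1).count v ≤ (t :: l2).count v) : l1.count v ≤ l2.count v := by
  by_cases hvt : v = t
  · subst hvt
    simp [List.count_cons_self] at h
    omega
  · have h1 : (t :: l1).count v = l1.count v := by
      simp [List.count_cons]
      exact fun hh => absurd hh.symm hvt
    have h2 : (t :: l2).count v = l2.count v := by
      simp [List.count_cons]
      exact fun hh => absurd hh.symm hvt
    rw [h1, h2] at h
    exact h

theorem pv_outer_end (ss : List Int) (X : Int) (n : Nat) (hn : ss.length ≤ n)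
    (table rem : List Int) (res : Int) :
    pvOuterA ss X (PySem.List.pyRange (n : Int) (ss.length : Int)) table res (rem.length : Int)
      = pvGoB X (ss.length - n) rem res := by
  rw [PySem.List.pyRange_one_eq_nil (by exact_mod_cast hn)]
  have h0 : ss.length - n = 0 := by omega
  rw [h0]
  rfl

theorem pv_outer (X : Int) (ss : List Int) (hsort : ss.Pairwise (· ≤ ·))
    (hb : ∀ v ∈ ss, 1 ≤ v ∧ v ≤ 700 ∧ X ≤ 700 + v) :
    ∀ (fuel n : Nat) (table rem : List Int) (res : Int),
      ss.length - n ≤ fuel →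
      pvTB table rem →
      (∀ v : Int, rem.count v ≤ (ss.drop n).count v) →
      rem.Pairwise (· ≤ ·) →
      pvOuterA ss X (PySem.List.pyRange (n : Int) (ss.length : Int)) table res (rem.length : Int)
        = pvGoB X (ss.length - n) rem res := by
  intro fuel
  induction fuel with
  | zero =>
      intro n table rem res hfuel hTB hcnt hsrem
      exact pv_outer_end ss X n (by omega) table rem res
  | succ f ihf =>
      intro n table rem res hfuel hTB hcnt hsrem
      by_cases hn : n < ss.length
      · obtain ⟨hl701, hTBc⟩ := hTB
        rw [PySem.List.pyRange_one_cons (by exact_mod_cast hn)]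
        by_cases hre : rem = []
        · subst hre
          simp [pvOuterA, pvGoB_nil]
        · simp only [pvOuterA]
          have hlenpos : 0 < rem.length := List.length_pos_iff.mpr hre
          rw [if_neg (by omega)]
          have htE : PySem.List.pyGetD ss ((n : Nat) : Int) 0 = ss[n] := by
            rw [PySem.List.pyGetD_natCast, List.getD_eq_getElem ss 0 hn]
          rw [htE]
          obtain ⟨ht1, ht7, htX⟩ := hb ss[n] (List.getElem_mem hn)
          have hlookup : PySem.List.pyGetD table ss[n] 0 = ((rem.count ss[n] : Nat) : Int) := by
            rw [pv_getD_conv table hl701 _ (by omega) ht7]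
            exact hTBc _ (by omega) ht7
          have hcast : ((n : Int) + 1) = (((n + 1 : Nat)) : Int) := by push_cast; ring
          have hdropn : ss.drop n = ss[n] :: ss.drop (n + 1) := List.drop_eq_getElem_cons hn
          have hfz : ss.length - n = (ss.length - (n + 1)) + 1 := by omega
          by_cases hskip : rem.count ss[n] = 0
          · rw [if_pos (by rw [hlookup]; exact_mod_cast hskip), hcast]
            have hcnt2 : ∀ v : Int, rem.count v ≤ (ss.drop (n + 1)).count v := by
              intro v
              have h := hcnt v
              rw [hdropn, List.count_cons] at h
              by_cases hvt : v = ss[n]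
              · rw [hvt]
                omega
              · have hvt' : ¬ ss[n] = v := fun hh => hvt hh.symm
                simp [hvt'] at h
                exact h
            have hsub : rem.Subperm (ss.drop (n + 1)) :=
              List.subperm_ext_iff.mpr (fun x _ => hcnt2 x)
            have hlenle : rem.length ≤ ss.length - (n + 1) := by
              have hle := hsub.length_le
              rw [List.length_drop] at hle
              exact hle
            calc pvOuterA ss X (PySem.List.pyRange ((n + 1 : Nat) : Int) (ss.length : Int))
                  table res (rem.length : Int)
                = pvGoB X (ss.length - (n + 1)) rem res :=
                  ihf (n + 1) table rem res (by omega) ⟨hl701, hTBc⟩ hcnt2 hsrem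
              _ = pvGoB X (ss.length - n) rem res :=
                  pvGoB_fuel_eq X _ _ rem res hlenle (by omega)
          · rw [if_neg (by rw [hlookup]; omega)]
            have hcpos : 0 < rem.count ss[n] := Nat.pos_of_ne_zero hskip
            have hmin : ∀ v ∈ rem, ss[n] ≤ v := by
              intro v hv
              have hvp : 0 < rem.count v := List.count_pos_iff.mpr hv
              have h2 := hcnt v
              have hvdrop : v ∈ ss.drop n := List.count_pos_iff.mp (by omega)
              rw [hdropn] at hvdrop
              rcases List.mem_cons.mp hvdrop with h | h
              · exact le_of_eq h.symm
              · have hpair : (ss.drop n).Pairwise (· ≤ ·) :=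
                  List.Pairwise.sublist (List.drop_sublist n ss) hsort
                rw [hdropn] at hpair
                exact (List.pairwise_cons.mp hpair).1 v h
            obtain ⟨rest, hremeq⟩ := pv_head_eq rem ss[n] hsrem (List.count_pos_iff.mp hcpos) hmin
            subst hremeq
            have hrestsort : rest.Pairwise (· ≤ ·) := (List.pairwise_cons.mp hsrem).2
            have hbrem : ∀ v ∈ rest, 1 ≤ v ∧ v ≤ 700 ∧ X ≤ 700 + v := by
              intro v hv
              have hvp : 0 < (ss[n] :: rest).count v :=
                List.count_pos_iff.mpr (List.mem_cons_of_mem _ hv)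
              have h2 := hcnt v
              have hvdrop : v ∈ ss.drop n := List.count_pos_iff.mp (by omega)
              exact hb v (List.mem_of_mem_drop hvdrop)
            set T1 := PySem.List.pySetD table ss[n] (PySem.List.pyGetD table ss[n] 0 - 1) with hT1def
            have hT1len : T1.length = 701 := by
              rw [hT1def, PySem.List.length_pySetD]; exact hl701
            have hT1get : ∀ v : Int, 0 ≤ v → v ≤ 700 →
                T1.getD v.toNat 0 = (rest.count v : Int) := by
              intro v h0 h7
              rw [hT1def, pv_dec_bucket table hl701 ss[n] (by omega) ht7 v h0 h7]
              by_cases hvt : v = ss[n]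
              · rw [if_pos hvt, hTBc ss[n] (by omega) ht7, hvt, List.count_cons_self]
                push_cast
                ring
              · rw [if_neg hvt, hTBc v h0 h7]
                have hcc : (ss[n] :: rest).count v = rest.count v := by
                  simp [List.count_cons]
                  exact fun h => absurd h.symm hvt
                rw [hcc]
            by_cases hex : ∃ v ∈ rest, v ≤ X - ss[n]
            · obtain ⟨v0, hv0m, hv0s⟩ := hex
              obtain ⟨K0, hK0lt, hK0v⟩ := List.mem_iff_getElem.mp hv0m
              obtain ⟨K, hKlt, hKval, hmgt'⟩ := pv_exists_greatest rest (X - ss[n]) K0 hK0lt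
                (by rw [List.getD_eq_getElem _ _ hK0lt, hK0v]; exact hv0s)
              have hmgt : ∀ nn : Nat, K < nn → nn < rest.length → X - ss[n] < rest.getD nn 0 :=
                hmgt'
              rw [List.getD_eq_getElem _ _ hKlt] at hKval
              have hmmem : rest[K] ∈ rest := List.getElem_mem hKlt
              obtain ⟨hm1, hm7, hmX⟩ := hbrem rest[K] hmmem
              have hvmax : ∀ v ∈ rest, v ≤ X - ss[n] → v ≤ rest[K] := by
                intro v hv hvs
                obtain ⟨i, hilt, hiv⟩ := List.mem_iff_getElem.mp hv
                by_cases hiK : i ≤ K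
                · rcases Nat.eq_or_lt_of_le hiK with h | h
                  · subst h
                    exact le_of_eq hiv.symm
                  · have := List.pairwise_iff_getElem.mp hrestsort i K hilt hKlt h
                    rw [← hiv]
                    exact this
                · have := hmgt i (by omega) hilt
                  rw [List.getD_eq_getElem _ _ hilt, hiv] at this
                  omega
              have hKm : rest.getD K 0 = rest[K] := List.getD_eq_getElem _ _ hKlt
              have hinner : pvInnerFind T1 (X - ss[n]) = some rest[K] := by
                unfold pvInnerFind
                exact pv_inner_some T1 hT1len rest[K] hm1
                  (by rw [hT1get rest[K] (by omega) hm7]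
                      exact_mod_cast List.count_pos_iff.mpr hmmem)
                  (X - ss[n]).toNat (X - ss[n]) le_rfl (by omega) (by omega)
                  (fun v hv1 hv2 => by
                    rw [hT1get v (by omega) (by omega)]
                    have hnm : v ∉ rest := fun hvm => absurd (hvmax v hvm hv2) (by omega)
                    simp [List.count_eq_zero_of_not_mem hnm])
              have hpart : pvPartner rest (X - ss[n]) ((rest.length : Int) - 1)
                  = some (rest.take K ++ rest.drop (K + 1)) :=
                pv_partner_eq_some rest (X - ss[n]) K hKlt (by rw [hKm]; exact hKval) hmgt
              rw [hinner]
              dsimp only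
              have hrestdec : rest = rest.take K ++ rest[K] :: rest.drop (K + 1) := by
                conv_lhs => rw [← List.take_append_drop K rest]
                rw [List.drop_eq_getElem_cons hKlt]
              have hcntdec : ∀ v : Int, rest.count v
                  = (rest.take K ++ rest.drop (K + 1)).count v + (if v = rest[K] then 1 else 0) := by
                intro v
                conv_lhs => rw [hrestdec]
                simp only [List.count_append, List.count_cons]
                by_cases hvm : v = rest[K]
                · simp [hvm]
                  omega
                · have hvm' : ¬ rest[K] = v := fun hh => hvm hh.symm
                  simp [hvm, hvm']
              have hT2len : (PySem.List.pySetD T1 rest[K] (PySem.List.pyGetD T1 rest[K] 0 - 1)).length = 701 := by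
                rw [PySem.List.length_pySetD]; exact hT1len
              have hT2get : ∀ v : Int, 0 ≤ v → v ≤ 700 →
                  (PySem.List.pySetD T1 rest[K] (PySem.List.pyGetD T1 rest[K] 0 - 1)).getD v.toNat 0
                    = ((rest.take K ++ rest.drop (K + 1)).count v : Int) := by
                intro v h0 h7
                rw [pv_dec_bucket T1 hT1len rest[K] (by omega) hm7 v h0 h7]
                by_cases hvm : v = rest[K]
                · rw [if_pos hvm, hT1get rest[K] (by omega) hm7, hvm]
                  have := hcntdec rest[K]
                  rw [if_pos rfl] at this
                  omega
                · rw [if_neg hvm, hT1get v h0 h7]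
                  have := hcntdec v
                  rw [if_neg hvm] at this
                  omega
              have hrem'sorted : (rest.take K ++ rest.drop (K + 1)).Pairwise (· ≤ ·) := by
                have hsub : (rest.take K ++ rest.drop (K + 1)).Sublist rest := by
                  rw [← List.eraseIdx_eq_take_drop_succ]
                  exact List.eraseIdx_sublist rest K
                exact List.Pairwise.sublist hsub hrestsort
              have hcnt' : ∀ v : Int,
                  (rest.take K ++ rest.drop (K + 1)).count v ≤ (ss.drop (n + 1)).count v := by
                intro v
                have h := hcnt v
                rw [hdropn, List.count_cons, List.count_cons] at h
                have hd := hcntdec v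
                by_cases hvt : v = ss[n] <;> by_cases hvm : v = rest[K] <;>
                  simp [hvt, hvm] at h hd ⊢ <;> omega
              have hlenarith : ((ss[n] :: rest).length : Int) - 2
                  = ((rest.take K ++ rest.drop (K + 1)).length : Int) := by
                simp [List.length_append, List.length_take, List.length_drop]
                omega
              rw [hlenarith, hcast, hfz, pvGoB_cons_some (ss.length - (n + 1)) res hpart]
              exact ihf (n + 1) _ _ (res + 1) (by omega) ⟨hT2len, hT2get⟩ hcnt' hrem'sorted
            · push_neg at hex
              have hinner : pvInnerFind T1 (X - ss[n]) = none := by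
                unfold pvInnerFind
                exact pv_inner_none T1 hT1len (X - ss[n]).toNat (X - ss[n]) le_rfl (by omega)
                  (fun v h1 h2 => by
                    rw [hT1get v (by omega) (by omega)]
                    have hnm : v ∉ rest := fun hvm => absurd (hex v hvm) (by omega)
                    simp [List.count_eq_zero_of_not_mem hnm])
              have hpart : pvPartner rest (X - ss[n]) ((rest.length : Int) - 1) = none :=
                pv_partner_eq_none rest (X - ss[n]) (fun nn h3 => by
                  rw [List.getD_eq_getElem _ _ h3]
                  have := hex rest[nn] (List.getElem_mem h3)
                  omega)
              rw [hinner]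
              dsimp only
              have hlenarith : ((ss[n] :: rest).length : Int) - 1 = (rest.length : Int) := by
                simp
              rw [hlenarith, hcast, hfz, pvGoB_cons_none (ss.length - (n + 1)) res hpart]
              refine ihf (n + 1) T1 rest (res + 1) (by omega) ⟨hT1len, hT1get⟩ ?_ hrestsort
              intro v
              have h := hcnt v
              rw [hdropn] at h
              exact pv_count_cons_le h
      · exact pv_outer_end ss X n (by omega) table rem res

-- ---- B-side abstraction: the two-pointer loop as a list process (first/last decomposition)

def pvT (X : Int) : List Int → Int
  | [] => 0
  | x :: rest =>
    if hr : rest = [] then 1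
    else if x + rest.getLast hr ≤ X then 1 + pvT X rest.dropLast
    else 1 + pvT X (x :: rest.dropLast)
termination_by l => l.length
decreasing_by
  · simp only [List.length_dropLast, List.length_cons]
    omega
  · have := List.length_pos_iff.mpr hr
    simp only [List.length_dropLast, List.length_cons]
    omega

theorem pvT_nil (X : Int) : pvT X [] = 0 := by simp [pvT]

theorem pvT_single (X x : Int) : pvT X [x] = 1 := by simp [pvT]

theorem pvT_cons_le (X x : Int) (rest : List Int) (hr : rest ≠ [])
    (h : x + rest.getLast hr ≤ X) : pvT X (x :: rest) = 1 + pvT X rest.dropLast := by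
  rw [pvT]
  rw [dif_neg hr, if_pos h]

theorem pvT_cons_gt (X x : Int) (rest : List Int) (hr : rest ≠ [])
    (h : ¬ x + rest.getLast hr ≤ X) : pvT X (x :: rest) = 1 + pvT X (x :: rest.dropLast) := by
  rw [pvT]
  rw [dif_neg hr, if_neg h]

-- ---- generic facts about the greedy

theorem pvGoB_shift (X : Int) : ∀ (f : Nat) (rem : List Int) (res : Int),
    pvGoB X f rem res = res + pvGoB X f rem 0 := by
  intro f
  induction f with
  | zero => intro rem res; simp [pvGoB]
  | succ f ih =>
      intro rem res
      cases rem with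
      | nil => simp [pvGoB_nil]
      | cons t rest =>
          cases hp : pvPartner rest (X - t) ((rest.length : Int) - 1) with
          | some r2 =>
              rw [pvGoB_cons_some f res hp, pvGoB_cons_some f 0 hp, ih r2 (res + 1), ih r2 (0 + 1)]
              ring
          | none =>
              rw [pvGoB_cons_none f res hp, pvGoB_cons_none f 0 hp, ih rest (res + 1), ih rest (0 + 1)]
              ring

theorem pvGoB_singleton (X y : Int) : pvGoB X 1 [y] 0 = 1 := by
  have hnone : pvPartner ([] : List Int) (X - y) ((([] : List Int).length : Int) - 1) = none :=
    pv_partner_eq_none [] (X - y) (fun n hn => absurd hn (by simp))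
  rw [show (1 : Nat) = 0 + 1 from rfl, pvGoB_cons_none 0 0 hnone, pvGoB_nil]
  omega

-- when no two elements can ever pair, the greedy and the two-pointer both count every element alone
theorem pv_single_goB (X : Int) : ∀ (l : List Int),
    l.Pairwise (fun a b => X < a + b) → pvGoB X l.length l 0 = (l.length : Int) := by
  intro l
  induction l with
  | nil => intro _; simp [pvGoB_nil]
  | cons t rest ih =>
      intro hp
      obtain ⟨hhead, htail⟩ := List.pairwise_cons.mp hp
      have hnone : pvPartner rest (X - t) ((rest.length : Int) - 1) = none :=
        pv_partner_eq_none rest (X - t) (fun n hn => by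
          have hm : rest.getD n 0 ∈ rest := by
            rw [List.getD_eq_getElem _ _ hn]; exact List.getElem_mem hn
          have := hhead _ hm
          omega)
      simp only [List.length_cons]
      rw [pvGoB_cons_none rest.length 0 hnone, pvGoB_shift, ih htail]
      push_cast
      ring

theorem pv_single_T (X : Int) : ∀ (n : Nat) (l : List Int), l.length ≤ n →
    l.Pairwise (fun a b => X < a + b) → pvT X l = (l.length : Int) := by
  intro n
  induction n with
  | zero =>
      intro l hl _
      have : l = [] := List.eq_nil_of_length_eq_zero (by omega)
      subst this
      simp [pvT_nil]
  | succ n ih =>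
      intro l hl hp
      cases l with
      | nil => simp [pvT_nil]
      | cons x rest =>
          by_cases hr : rest = []
          · subst hr
            simp [pvT_single]
          · have hy : rest.getLast hr ∈ rest := List.getLast_mem hr
            have hxy : X < x + rest.getLast hr := (List.pairwise_cons.mp hp).1 _ hy
            rw [pvT_cons_gt X x rest hr (by omega)]
            have hsub : (x :: rest.dropLast).Sublist (x :: rest) :=
              List.Sublist.cons₂ x (List.dropLast_sublist rest)
            have hlpos : 0 < rest.length := List.length_pos_iff.mpr hr
            have := ih (x :: rest.dropLast)
              (by simp only [List.length_cons, List.length_dropLast] at *; omega)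
              (List.Pairwise.sublist hsub hp)
            rw [this]
            simp only [List.length_cons, List.length_dropLast]
            push_cast
            omega

-- appending one element too large to pair with anything adds exactly one singleton group
theorem pv_append_big (X y : Int) : ∀ (n : Nat) (m : List Int), m.length ≤ n →
    (∀ t ∈ m, X < t + y) →
    pvGoB X (m ++ [y]).length (m ++ [y]) 0 = 1 + pvGoB X m.length m 0 := by
  intro n
  induction n with
  | zero =>
      intro m hm _
      have : m = [] := List.eq_nil_of_length_eq_zero (by omega)
      subst this
      simp only [List.nil_append, List.length_cons, List.length_nil]
      rw [pvGoB_singleton, pvGoB_nil]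
      omega
  | succ n ih =>
      intro m hm hcond
      cases m with
      | nil =>
          simp only [List.nil_append, List.length_cons, List.length_nil]
          rw [pvGoB_singleton, pvGoB_nil]
          omega
      | cons t m' =>
          have hty : X < t + y := hcond t List.mem_cons_self
          have hylast : ((m' ++ [y]).getD m'.length 0) = y := by
            rw [List.getD_eq_getElem _ _ (by simp)]
            simp
          by_cases hex : ∃ i : Nat, i < m'.length ∧ m'.getD i 0 ≤ X - t
          · obtain ⟨i0, hi0, hi0le⟩ := hex
            obtain ⟨K, hK, hKle, hKmax⟩ := pv_exists_greatest m' (X - t) i0 hi0 hi0le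
            set m'' := m'.take K ++ m'.drop (K + 1) with hm''def
            have hm''len : m''.length + 1 = m'.length := by
              simp [hm''def, List.length_take, List.length_drop]
              omega
            -- partner scan on m' ++ [y] finds the same index K
            have hpartA : pvPartner (m' ++ [y]) (X - t) (((m' ++ [y]).length : Int) - 1)
                = some (m'' ++ [y]) := by
              have := pv_partner_eq_some (m' ++ [y]) (X - t) K (by simp; omega)
                (by rw [List.getD_eq_getElem _ _ (by simp; omega),
                        List.getElem_append_left hK, ← List.getD_eq_getElem _ _ hK]; exact hKle)
                (fun nn h1 h2 => by
                  simp only [List.length_append, List.length_cons, List.length_nil] at h2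
                  by_cases hnn : nn < m'.length
                  · rw [List.getD_eq_getElem _ _ (by simp; omega),
                        List.getElem_append_left hnn, ← List.getD_eq_getElem _ _ hnn]
                    exact hKmax nn h1 hnn
                  · have hnn' : nn = m'.length := by omega
                    rw [hnn', hylast]
                    omega)
              rw [this]
              congr 1
              rw [List.take_append_of_le_length (by omega),
                  List.drop_append_of_le_length (by omega), ← List.append_assoc]
            have hpartB : pvPartner m' (X - t) ((m'.length : Int) - 1) = some m'' :=
              pv_partner_eq_some m' (X - t) K hK hKle hKmax
            have hmem'' : ∀ w ∈ m'', X < w + y := by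
              intro w hw
              rcases List.mem_append.mp hw with h | h
              · exact hcond w (List.mem_cons_of_mem t (List.mem_of_mem_take h))
              · exact hcond w (List.mem_cons_of_mem t (List.mem_of_mem_drop h))
            simp only [List.length_cons] at hm
            have hih := ih m'' (by omega) hmem''
            have hA : pvGoB X ((t :: m' ++ [y]).length) (t :: m' ++ [y]) 0
                = 2 + pvGoB X m''.length m'' 0 := by
              rw [show ((t :: m' ++ [y]).length) = (m'.length + 1) + 1 from by simp,
                  show (t :: m' ++ [y]) = t :: (m' ++ [y]) from by simp,
                  pvGoB_cons_some (m'.length + 1) 0 hpartA,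
                  pvGoB_shift X (m'.length + 1) (m'' ++ [y]) (0 + 1),
                  pvGoB_fuel_eq X (m'.length + 1) (m'' ++ [y]).length (m'' ++ [y]) 0
                    (by simp; omega) le_rfl,
                  hih]
              omega
            have hB : pvGoB X ((t :: m').length) (t :: m') 0
                = 1 + pvGoB X m''.length m'' 0 := by
              rw [show ((t :: m').length) = m'.length + 1 from by simp,
                  pvGoB_cons_some m'.length 0 hpartB,
                  pvGoB_shift X m'.length m'' (0 + 1),
                  pvGoB_fuel_eq X m'.length m''.length m'' 0 (by omega) le_rfl]
              omega
            rw [hA, hB]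
            omega
          · push_neg at hex
            have hpartA : pvPartner (m' ++ [y]) (X - t) (((m' ++ [y]).length : Int) - 1)
                = none :=
              pv_partner_eq_none (m' ++ [y]) (X - t) (fun nn h2 => by
                simp only [List.length_append, List.length_cons, List.length_nil] at h2
                by_cases hnn : nn < m'.length
                · rw [List.getD_eq_getElem _ _ (by simp; omega),
                      List.getElem_append_left hnn, ← List.getD_eq_getElem _ _ hnn]
                  exact hex nn hnn
                · have hnn' : nn = m'.length := by omega
                  rw [hnn', hylast]
                  omega)
            have hpartB : pvPartner m' (X - t) ((m'.length : Int) - 1) = none :=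
              pv_partner_eq_none m' (X - t) (fun nn h2 => hex nn h2)
            simp only [List.length_cons] at hm
            have hih := ih m' (by omega) (fun w hw => hcond w (List.mem_cons_of_mem t hw))
            have hA : pvGoB X ((t :: m' ++ [y]).length) (t :: m' ++ [y]) 0
                = 2 + pvGoB X m'.length m' 0 := by
              rw [show ((t :: m' ++ [y]).length) = (m'.length + 1) + 1 from by simp,
                  show (t :: m' ++ [y]) = t :: (m' ++ [y]) from by simp,
                  pvGoB_cons_none (m'.length + 1) 0 hpartA,
                  pvGoB_shift X (m'.length + 1) (m' ++ [y]) (0 + 1),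
                  pvGoB_fuel_eq X (m'.length + 1) (m' ++ [y]).length (m' ++ [y]) 0
                    (by simp) le_rfl,
                  hih]
              omega
            have hB : pvGoB X ((t :: m').length) (t :: m') 0
                = 1 + pvGoB X m'.length m' 0 := by
              rw [show ((t :: m').length) = m'.length + 1 from by simp,
                  pvGoB_cons_none m'.length 0 hpartB,
                  pvGoB_shift X m'.length m' (0 + 1)]
              omega
            rw [hA, hB]
            omega

-- ---- the main combinatorial theorem: greedy (smallest with largest fitting) = two-pointer

theorem pv_goB_eq_T (X : Int) : ∀ (n : Nat) (l : List Int), l.length ≤ n →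
    l.Pairwise (· ≤ ·) → pvGoB X l.length l 0 = pvT X l := by
  intro n
  induction n with
  | zero =>
      intro l hl _
      have : l = [] := List.eq_nil_of_length_eq_zero (by omega)
      subst this
      simp [pvGoB_nil, pvT_nil]
  | succ n ih =>
      intro l hl hsorted
      cases l with
      | nil => simp [pvGoB_nil, pvT_nil]
      | cons x rest =>
          simp only [List.length_cons] at hl
          by_cases hr : rest = []
          · subst hr
            simp only [List.length_cons, List.length_nil]
            rw [pvGoB_singleton, pvT_single]
          · obtain ⟨hxle, hrest_sorted⟩ := List.pairwise_cons.mp hsorted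
            have hR : 0 < rest.length := List.length_pos_iff.mpr hr
            set y := rest.getLast hr with hydef
            have hyval : rest.getD (rest.length - 1) 0 = y := by
              rw [List.getD_eq_getElem _ _ (by omega), hydef, List.getLast_eq_getElem]
            by_cases hxy : x + y ≤ X
            · -- pair the ends: the greedy also removes the last element
              have hpart : pvPartner rest (X - x) ((rest.length : Int) - 1)
                  = some rest.dropLast := by
                have := pv_partner_eq_some rest (X - x) (rest.length - 1) (by omega)
                  (by rw [hyval]; omega) (fun nn h1 h2 => by omega)
                rw [this]
                congr 1
                rw [show rest.length - 1 + 1 = rest.length from by omega, List.drop_length,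
                    List.append_nil, List.dropLast_eq_take]
              simp only [List.length_cons]
              rw [pvGoB_cons_some rest.length 0 hpart, pvGoB_shift,
                  pvGoB_fuel_eq X rest.length rest.dropLast.length rest.dropLast 0
                    (by simp only [List.length_dropLast, List.length_cons]; omega) le_rfl,
                  ih rest.dropLast (by simp only [List.length_dropLast, List.length_cons]; omega)
                    (List.Pairwise.sublist (List.dropLast_sublist rest) hrest_sorted),
                  pvT_cons_le X x rest hr hxy]
              ring
            · by_cases hex : ∃ i : Nat, i < rest.length ∧ rest.getD i 0 ≤ X - x
              · obtain ⟨i0, hi0, hi0le⟩ := hex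
                obtain ⟨K, hK, hKle, hKmax⟩ := pv_exists_greatest rest (X - x) i0 hi0 hi0le
                have hKne : K < rest.length - 1 := by
                  rcases Nat.lt_or_ge K (rest.length - 1) with h | h
                  · exact h
                  · exfalso
                    have : K = rest.length - 1 := by omega
                    rw [this, hyval] at hKle
                    omega
                set m := rest.take K ++ rest.drop (K + 1) with hmdef
                have hpart : pvPartner rest (X - x) ((rest.length : Int) - 1) = some m :=
                  pv_partner_eq_some rest (X - x) K hK hKle hKmax
                have hmlen : m.length + 1 = rest.length := by
                  simp [hmdef, List.length_take, List.length_drop]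
                  omega
                -- m ends in y: write m = m0 ++ [y]
                have hdnil : rest.drop (K + 1) ≠ [] := by
                  intro hc
                  have := congrArg List.length hc
                  simp [List.length_drop] at this
                  omega
                have hglast : (rest.drop (K + 1)).getLast hdnil = y := by
                  rw [List.getLast_eq_getElem, List.getElem_drop, hydef,
                      List.getLast_eq_getElem]
                  congr 1
                  simp [List.length_drop]
                  omega
                set m0 := rest.take K ++ (rest.drop (K + 1)).dropLast with hm0def
                have hm : m = m0 ++ [y] := by
                  rw [hmdef, hm0def, List.append_assoc]
                  congr 1
                  rw [← hglast, List.dropLast_append_getLast hdnil]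
                have hm0mem : ∀ w ∈ m0, X < w + y := by
                  intro w hw
                  have hwrest : w ∈ rest := by
                    rcases List.mem_append.mp hw with h | h
                    · exact List.mem_of_mem_take h
                    · exact List.mem_of_mem_drop (List.mem_of_mem_dropLast h)
                  have := hxle w hwrest
                  omega
                have hL := pv_append_big X y m0.length m0 le_rfl hm0mem
                -- the greedy on (x :: rest.dropLast) removes the same index K
                have hpartD : pvPartner rest.dropLast (X - x) ((rest.dropLast.length : Int) - 1)
                    = some m0 := by
                  have := pv_partner_eq_some rest.dropLast (X - x) K
                    (by simp only [List.length_dropLast, List.length_cons]; omega)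
                    (by rw [List.getD_eq_getElem _ _ (by simp only [List.length_dropLast, List.length_cons]; omega),
                            List.getElem_dropLast, ← List.getD_eq_getElem _ _ hK]; exact hKle)
                    (fun nn h1 h2 => by
                      simp only [List.length_dropLast] at h2
                      rw [List.getD_eq_getElem _ _ (by simp only [List.length_dropLast, List.length_cons]; omega),
                          List.getElem_dropLast, ← List.getD_eq_getElem _ _ (by omega : nn < rest.length)]
                      exact hKmax nn h1 (by omega))
                  rw [this]
                  have h1 : rest.dropLast.take K = rest.take K := by
                    rw [List.dropLast_eq_take, List.take_take, min_eq_left (by omega)]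
                  have h2 : rest.dropLast.drop (K + 1) = (rest.drop (K + 1)).dropLast := by
                    rw [List.dropLast_eq_take, List.drop_take, List.dropLast_eq_take,
                        List.length_drop]
                    congr 1
                    omega
                  rw [h1, h2, hm0def]
                have hih := ih (x :: rest.dropLast)
                  (by simp only [List.length_dropLast, List.length_cons]; omega)
                  (List.Pairwise.sublist (List.Sublist.cons₂ x (List.dropLast_sublist rest)) hsorted)
                have hm0len : m0.length + 2 = rest.length := by
                  simp [hm0def, List.length_take, List.length_drop, List.length_dropLast]
                  omega
                -- evaluate the greedy side of hih
                have hihL : pvGoB X (x :: rest.dropLast).length (x :: rest.dropLast) 0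
                    = 1 + pvGoB X m0.length m0 0 := by
                  simp only [List.length_cons]
                  rw [pvGoB_cons_some rest.dropLast.length 0 hpartD, pvGoB_shift,
                      pvGoB_fuel_eq X rest.dropLast.length m0.length m0 0
                        (by simp only [List.length_dropLast, List.length_cons]; omega) le_rfl]
                  ring
                simp only [List.length_cons]
                rw [pvGoB_cons_some rest.length 0 hpart, pvGoB_shift,
                    pvGoB_fuel_eq X rest.length m.length m 0 (by omega) le_rfl]
                rw [hm] at hmlen ⊢
                rw [hL]
                rw [pvT_cons_gt X x rest hr hxy, ← hih, hihL]
                ring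
              · -- nothing fits the minimum, hence nothing ever pairs
                push_neg at hex
                have hbig : (x :: rest).Pairwise (fun a b => X < a + b) := by
                  rw [List.pairwise_cons]
                  constructor
                  · intro b hb
                    obtain ⟨i, hilt, hiv⟩ := List.mem_iff_getElem.mp hb
                    have := hex i hilt
                    rw [List.getD_eq_getElem _ _ hilt, hiv] at this
                    omega
                  · rw [List.pairwise_iff_getElem]
                    intro i j hi hj hij
                    have h1 : x ≤ rest[i] := hxle _ (List.getElem_mem hi)
                    have h2 := hex j hj
                    rw [List.getD_eq_getElem _ _ hj] at h2
                    omega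
                rw [pv_single_goB X (x :: rest) hbig, pv_single_T X (x :: rest).length (x :: rest) le_rfl hbig]
          
-- ---- bridge: the index two-pointer loop computes pvT of the segment a[lo..hi]

theorem pv_seg_cons (a : List Int) (L H : Nat) (hLH : L ≤ H) (hH : H < a.length) :
    (a.drop L).take (H + 1 - L) = a[L] :: (a.drop (L + 1)).take (H - L) := by
  rw [List.drop_eq_getElem_cons (by omega : L < a.length),
      show H + 1 - L = (H - L) + 1 from by omega, List.take_succ_cons]

theorem pv_seg_concat (a : List Int) (L H : Nat) (hLH : L ≤ H) (hH : H < a.length) :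
    (a.drop L).take (H + 1 - L) = (a.drop L).take (H - L) ++ [a[H]] := by
  rw [show H + 1 - L = (H - L) + 1 from by omega, List.take_add_one]
  congr 1
  have hidx : L + (H - L) = H := by omega
  have h1 : (a.drop L)[H - L]? = some a[H] := by
    rw [List.getElem?_drop, hidx, List.getElem?_eq_getElem hH]
  rw [h1]
  rfl

theorem pvTP_eq_T (a : List Int) (X : Int) : ∀ (f : Nat) (lo hi res : Int), 0 ≤ lo →
    hi < (a.length : Int) → (hi + 1 - lo).toNat ≤ f →
    pvTP a X f lo hi res = res + pvT X ((a.drop lo.toNat).take (hi + 1 - lo).toNat) := by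
  intro f
  induction f with
  | zero =>
      intro lo hi res hlo hhi hf
      have h0 : (hi + 1 - lo).toNat = 0 := by omega
      rw [h0]
      simp [pvTP, pvT_nil]
  | succ f ih =>
      intro lo hi res hlo hhi hf
      by_cases hlh : lo ≤ hi
      · have hL : lo.toNat ≤ hi.toNat := by omega
        have hHlt : hi.toNat < a.length := by omega
        have hnum : (hi + 1 - lo).toNat = hi.toNat + 1 - lo.toNat := by omega
        by_cases heq : lo = hi
        · -- single element segment: the pair branch is off either way
          have hpairF : ¬ (lo < hi ∧ PySem.List.pyGetD a lo 0 + PySem.List.pyGetD a hi 0 ≤ X) := by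
            intro hc
            omega
          simp only [pvTP]
          rw [if_pos hlh, if_neg hpairF,
              ih lo (hi - 1) (res + 1) hlo (by omega) (by omega)]
          have hseg1 : (hi - 1 + 1 - lo).toNat = 0 := by omega
          rw [hseg1]
          have hseg2 : (hi + 1 - lo).toNat = 1 := by omega
          rw [hseg2]
          have hone : List.take 1 (List.drop lo.toNat a) = [a[lo.toNat]] := by
            rw [show (1 : Nat) = lo.toNat + 1 - lo.toNat from by omega,
                pv_seg_cons a lo.toNat lo.toNat le_rfl (by omega)]
            simp
          rw [hone, pvT_single]
          simp only [List.take_zero, pvT_nil]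
          ring
        · -- lo < hi: the segment has head a[lo] and last a[hi]
          have hlt : lo < hi := by omega
          have hgl : PySem.List.pyGetD a lo 0 = a[lo.toNat] := by
            rw [PySem.List.pyGetD_eq_getElem a 0 hlo (by omega)]
          have hgh : PySem.List.pyGetD a hi 0 = a[hi.toNat] := by
            rw [PySem.List.pyGetD_eq_getElem a 0 (by omega) hhi]
          have hLlt : lo.toNat < hi.toNat := by omega
          -- decompose the segment
          have hsegC : (a.drop lo.toNat).take (hi + 1 - lo).toNat
              = a[lo.toNat] :: ((a.drop (lo.toNat + 1)).take (hi.toNat - 1 - lo.toNat) ++ [a[hi.toNat]]) := by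
            rw [hnum, pv_seg_cons a lo.toNat hi.toNat hL hHlt]
            congr 1
            have h2 : (a.drop (lo.toNat + 1)).take (hi.toNat - lo.toNat)
                = (a.drop (lo.toNat + 1)).take (hi.toNat + 1 - (lo.toNat + 1)) := by
              congr 1
              omega
            rw [h2, pv_seg_concat a (lo.toNat + 1) hi.toNat (by omega) hHlt]
            congr 2
            omega
          have hrne : ((a.drop (lo.toNat + 1)).take (hi.toNat - 1 - lo.toNat) ++ [a[hi.toNat]]) ≠ [] := by
            simp
          have hrlast : (((a.drop (lo.toNat + 1)).take (hi.toNat - 1 - lo.toNat) ++ [a[hi.toNat]])).getLast hrne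
              = a[hi.toNat] := List.getLast_concat
          have hrdrop : (((a.drop (lo.toNat + 1)).take (hi.toNat - 1 - lo.toNat) ++ [a[hi.toNat]])).dropLast
              = (a.drop (lo.toNat + 1)).take (hi.toNat - 1 - lo.toNat) := List.dropLast_concat
          by_cases hsum : a[lo.toNat] + a[hi.toNat] ≤ X
          · have hpairT : lo < hi ∧ PySem.List.pyGetD a lo 0 + PySem.List.pyGetD a hi 0 ≤ X :=
              ⟨hlt, by rw [hgl, hgh]; exact hsum⟩
            simp only [pvTP]
            rw [if_pos hlh, if_pos hpairT,
                ih (lo + 1) (hi - 1) (res + 1) (by omega) (by omega) (by omega)]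
            rw [hsegC, pvT_cons_le X a[lo.toNat] _ hrne (by rw [hrlast]; exact hsum), hrdrop]
            have hseg' : ((hi - 1) + 1 - (lo + 1)).toNat = hi.toNat - 1 - lo.toNat := by omega
            have hlo' : (lo + 1).toNat = lo.toNat + 1 := by omega
            rw [hseg', hlo']
            ring
          · have hpairF : ¬ (lo < hi ∧ PySem.List.pyGetD a lo 0 + PySem.List.pyGetD a hi 0 ≤ X) := by
              intro hc
              rw [hgl, hgh] at hc
              exact hsum hc.2
            simp only [pvTP]
            rw [if_pos hlh, if_neg hpairF,
                ih lo (hi - 1) (res + 1) hlo (by omega) (by omega)]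
            rw [hsegC, pvT_cons_gt X a[lo.toNat] _ hrne (by rw [hrlast]; exact hsum), hrdrop]
            have hseg' : ((hi - 1) + 1 - lo).toNat = hi.toNat - lo.toNat := by omega
            rw [hseg']
            have hsegD : (a.drop lo.toNat).take (hi.toNat - lo.toNat)
                = a[lo.toNat] :: (a.drop (lo.toNat + 1)).take (hi.toNat - 1 - lo.toNat) := by
              have h3 : hi.toNat - lo.toNat = (hi.toNat - 1) + 1 - lo.toNat := by omega
              rw [h3, pv_seg_cons a lo.toNat (hi.toNat - 1) (by omega) (by omega)]
            rw [hsegD]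
            ring
      · have h0 : (hi + 1 - lo).toNat = 0 := by omega
        simp only [pvTP]
        rw [if_neg hlh, h0]
        simp [pvT_nil]

-- ===== VERDICT (by name: the statement is the Claim_ definition above) =====
theorem solve_small_spec : Claim_equal_solve_small := by
  unfold Claim_equal_solve_small
  intro case _ hpre
  obtain ⟨N, X, Ss⟩ := case
  by_cases hneg : N ≤ 0
  · -- both loops are empty
    show solve_small (N, X, Ss) = solve_small_alt (N, X, Ss)
    have hB : solve_small_alt (N, X, Ss) = 0 := by
      simp only [solve_small_alt]
      rw [if_pos hneg]
    rw [hB]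
    show pvOuterA (PySem.List.sorted Ss (fun x => x) false) X (PySem.List.pyRange 0 N)
        (pvBuildTable Ss (PySem.List.pyRange 0 N) (List.replicate 701 0)) 0 N = 0
    rw [PySem.List.pyRange_one_eq_nil (by omega)]
    rfl
  · rcases hpre with h | ⟨hN, hbS⟩
    · omega
    have hN' : N = (Ss.length : Int) := hN
    have hbS' : ∀ v ∈ Ss, 1 ≤ v ∧ v ≤ 700 ∧ X ≤ 700 + v := hbS
    subst hN'
    show solve_small ((Ss.length : Int), X, Ss) = solve_small_alt ((Ss.length : Int), X, Ss)
    show pvOuterA (PySem.List.sorted Ss (fun x => x) false) X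
        (PySem.List.pyRange 0 (Ss.length : Int))
        (pvBuildTable Ss (PySem.List.pyRange 0 (Ss.length : Int)) (List.replicate 701 0))
        0 (Ss.length : Int)
      = solve_small_alt ((Ss.length : Int), X, Ss)
    set ss := PySem.List.sorted Ss (fun x => x) false with hssdef
    have hsort : ss.Pairwise (· ≤ ·) := PySem.List.sorted_pairwise Ss (fun x => x)
    have hperm : ss.Perm Ss := PySem.List.sorted_perm Ss (fun x => x) false
    have hbss : ∀ v ∈ ss, 1 ≤ v ∧ v ≤ 700 ∧ X ≤ 700 + v := fun v hv =>
      hbS' v ((PySem.List.mem_sorted Ss (fun x => x) false v).mp hv)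
    have hlen : ss.length = Ss.length := PySem.List.length_sorted Ss (fun x => x) false
    -- A's loop equals the list greedy
    have hbuild : pvBuildTable Ss (PySem.List.pyRange 0 (Ss.length : Int)) (List.replicate 701 0)
        = Ss.foldl (fun tb v' => PySem.List.pySetD tb v' (PySem.List.pyGetD tb v' 0 + 1))
            (List.replicate 701 0) := by
      unfold pvBuildTable
      exact PySem.List.foldl_pyRange_zero_pyGetD' Ss 0
        (fun tb v' => PySem.List.pySetD tb v' (PySem.List.pyGetD tb v' 0 + 1))
        (List.replicate 701 0)
    have hTB0 : pvTB (pvBuildTable Ss (PySem.List.pyRange 0 (Ss.length : Int))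
        (List.replicate 701 0)) ss := by
      constructor
      · rw [hbuild, pv_build_len, List.length_replicate]
      · intro v h0 h7
        rw [hbuild, pv_build Ss (List.replicate 701 0) (by rw [List.length_replicate])
            (fun w hw => ⟨(hbS' w hw).1, (hbS' w hw).2.1⟩) v h0 h7]
        have hrep : (List.replicate 701 (0 : Int)).getD v.toNat 0 = 0 := by
          rw [List.getD_eq_getElem _ 0 (by rw [List.length_replicate]; omega),
              List.getElem_replicate]
        rw [hrep, hperm.count_eq v]
        omega
    have hout := pv_outer X ss hsort hbss ss.length 0 _ ss 0 (by omega) hTB0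
      (fun v => by rw [List.drop_zero]) hsort
    simp only [Nat.cast_zero, Nat.sub_zero, hlen] at hout
    rw [hout]
    -- the list greedy equals pvT by the main theorem
    rw [pvGoB_fuel_eq X Ss.length ss.length ss 0 (by omega) le_rfl,
        pv_goB_eq_T X ss.length ss le_rfl hsort]
    -- B's two-pointer loop computes pvT of the whole sorted list
    by_cases hemp : Ss.length = 0
    · have hss : ss = [] := by
        have := hlen
        rw [hemp] at this
        exact List.eq_nil_of_length_eq_zero this
      rw [hss, pvT_nil]
      simp only [solve_small_alt]
      rw [if_pos (by omega)]
    · have hpos : 0 < Ss.length := Nat.pos_of_ne_zero hemp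
      have hB : solve_small_alt ((Ss.length : Int), X, Ss)
          = pvTP ss X ((Ss.length : Int)).toNat 0 ((Ss.length : Int) - 1) 0 := by
        simp only [solve_small_alt, hssdef]
        rw [if_neg (by omega)]
      rw [hB, pvTP_eq_T ss X ((Ss.length : Int)).toNat 0 ((Ss.length : Int) - 1) 0 le_rfl
            (by omega) (by omega)]
      have hfull : (((Ss.length : Int) - 1) + 1 - 0).toNat = ss.length := by omega
      rw [hfull]
      simp only [Int.toNat_zero, List.drop_zero, List.take_length]
      ring
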